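-- pv_equiv track=rewrite | github.com/netpack/vaitp-auditor | deployment/update_changelog.py | insert_changelog_entry
-- ===== SOURCE A (Python) =====
-- def insert_changelog_entry(changelog_content: str, entry: str) -> str:
--     """Insert a new changelog entry at the appropriate position."""
--     lines = changelog_content.split('\n')
--
--     # Find the insertion point (after the header, before the first version entry)
--     insert_index = len(lines)
--
--     for i, line in enumerate(lines):
--         if line.startswith('## [') and i > 0:
--             insert_index = i
--             break
--
--     # Insert the new entry
--     entry_lines = entry.split('\n')
--     for j, entry_line in enumerate(entry_lines):
--         lines.insert(insert_index + j, entry_line)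
--
--     return '\n'.join(lines)
-- ===== SOURCE B (Python) =====
-- def insert_changelog_entry(changelog_content: str, entry: str) -> str:
--     """Insert a new changelog entry at the appropriate position."""
--     pos = changelog_content.find('\n## [')
--     if pos != -1:
--         return changelog_content[:pos + 1] + entry + '\n' + changelog_content[pos + 1:]
--     return changelog_content + '\n' + entry
-- ===== Notes on version B (the rewrite author's own statement) =====
-- stated objective: simpler
-- what changed: A splits the changelog into a line list, scans it with enumerate to find the first version header, inserts the entry's lines one by one with list.insert and re-joins; B does no line splitting at all: one str.find of ' ## [' locates the first header after line 0 and the result is assembled by two slices around that newline.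
import Mathlib
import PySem

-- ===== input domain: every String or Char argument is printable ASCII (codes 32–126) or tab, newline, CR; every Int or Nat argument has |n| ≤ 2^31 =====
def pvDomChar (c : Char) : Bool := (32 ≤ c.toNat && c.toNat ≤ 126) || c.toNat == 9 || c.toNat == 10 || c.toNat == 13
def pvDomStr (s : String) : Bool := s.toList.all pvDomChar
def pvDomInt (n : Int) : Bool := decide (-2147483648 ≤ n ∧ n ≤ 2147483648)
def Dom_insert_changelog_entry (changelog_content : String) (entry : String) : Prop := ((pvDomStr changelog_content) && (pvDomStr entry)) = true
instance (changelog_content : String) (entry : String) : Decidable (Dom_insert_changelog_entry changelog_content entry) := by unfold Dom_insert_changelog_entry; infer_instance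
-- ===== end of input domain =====

-- B replaces A's split-into-lines / scan / repeated list.insert pipeline by a single
-- substring search for "\n## [" and one slice concatenation (objective: simpler).

-- ===== PORT A =====
-- '## [' of A's startswith test
def pvHeaderPat : List Char := ['#', '#', ' ', '[']

-- the 'for i, line in enumerate(lines): if line.startswith('## [') and i > 0: break' loop
def pvFindIdxA (i : Nat) (ls : List (List Char)) (d : Nat) : Nat :=
  match ls with
  | [] => d
  | l :: rest =>
    if PySem.Chars.startswith l pvHeaderPat && decide (0 < i) then i
    else pvFindIdxA (i + 1) rest d

-- the 'for j, entry_line in enumerate(entry_lines): lines.insert(insert_index + j, entry_line)' loop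
def pvInsLoopA (idx j : Nat) (elines lines : List (List Char)) : List (List Char) :=
  match elines with
  | [] => lines
  | el :: rest => pvInsLoopA idx (j + 1) rest (PySem.List.insert lines ((idx : Int) + (j : Int)) el)

def insert_changelog_entry (changelog_content : String) (entry : String) : String :=
  let lines := PySem.Chars.splitOn changelog_content.toList ['\n']
  let insert_index := pvFindIdxA 0 lines lines.length
  let entry_lines := PySem.Chars.splitOn entry.toList ['\n']
  String.ofList (PySem.Chars.join ['\n'] (pvInsLoopA insert_index 0 entry_lines lines))

-- ===== PORT B =====
-- '\n## [' searched by Source B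
def pvPatB : List Char := ['\n', '#', '#', ' ', '[']

def insert_changelog_entry_alt (changelog_content : String) (entry : String) : String :=
  let cs := changelog_content.toList
  let pos := PySem.Chars.find cs pvPatB
  if pos ≠ -1 then
    String.ofList (PySem.List.slice cs none (some (pos + 1)) ++ entry.toList ++ '\n' :: PySem.List.slice cs (some (pos + 1)) none)
  else
    String.ofList (cs ++ '\n' :: entry.toList)

-- ===== PRECONDITION & SPEC =====
def Spec_insert_changelog_entry (changelog_content : String) (entry : String) (out : String) : Prop := out = insert_changelog_entry_alt changelog_content entry
instance (changelog_content : String) (entry : String) (out : String) : Decidable (Spec_insert_changelog_entry changelog_content entry out) := by unfold Spec_insert_changelog_entry; infer_instance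

-- ===== CLAIM (what is proved, stated in full; the proofs are below) =====
def Claim_equal_insert_changelog_entry : Prop := ∀ (changelog_content : String) (entry : String), Dom_insert_changelog_entry changelog_content entry → Spec_insert_changelog_entry changelog_content entry (insert_changelog_entry changelog_content entry)

-- ===== LEMMAS AND PROOFS =====

-- PySem's Python-exact splitOn on a one-character separator is Mathlib's List.splitOn
theorem pvGo_eq (nl : Char) : ∀ (fuel : Nat) (l cur : List Char) (acc : List (List Char)), l.length < fuel →
    PySem.Chars.splitOn.go [nl] fuel l cur acc
      = acc.reverse ++ List.modifyHead (cur.reverse ++ ·) (l.splitOn nl) := by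
  intro fuel
  induction fuel with
  | zero => intro l cur acc h; omega
  | succ n ih =>
    intro l cur acc h
    cases l with
    | nil =>
      have hstep : PySem.Chars.splitOn.go [nl] (n + 1) [] cur acc
          = (cur.reverse :: acc).reverse := rfl
      rw [hstep, List.splitOn_nil]
      simp
    | cons c rest =>
      have hstep : PySem.Chars.splitOn.go [nl] (n + 1) (c :: rest) cur acc
          = if [nl].isPrefixOf (c :: rest) = true
            then PySem.Chars.splitOn.go [nl] n rest [] (cur.reverse :: acc)
            else PySem.Chars.splitOn.go [nl] n rest (c :: cur) acc := rfl
      rw [hstep]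
      have hsplit : (c :: rest).splitOn nl
          = if c = nl then [] :: rest.splitOn nl
            else List.modifyHead (List.cons c) (rest.splitOn nl) := by
        by_cases hc : c = nl
        · rw [if_pos hc]; simp [List.splitOn, List.splitOnP_cons, hc]
        · rw [if_neg hc]; simp [List.splitOn, List.splitOnP_cons, hc]
      have hne : rest.splitOn nl ≠ [] := List.splitOnP_ne_nil _ _
      by_cases hc : c = nl
      · rw [if_pos (by simp [List.isPrefixOf, hc]), hsplit, if_pos hc,
            ih rest [] (cur.reverse :: acc) (by simp at h; omega)]
        cases hs : rest.splitOn nl with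
        | nil => exact absurd hs hne
        | cons p ps => simp
      · rw [if_neg (by simp [List.isPrefixOf]; intro he; exact absurd he.symm hc), hsplit, if_neg hc,
            ih rest (c :: cur) acc (by simp at h; omega)]
        cases hs : rest.splitOn nl with
        | nil => exact absurd hs hne
        | cons p ps => simp

theorem pvSplitOn_eq (nl : Char) (s : List Char) :
    PySem.Chars.splitOn s [nl] = s.splitOn nl := by
  rw [PySem.Chars.splitOn, pvGo_eq nl (s.length + 1) s [] [] (by omega)]
  cases hs : s.splitOn nl with
  | nil => exact absurd hs (by simp [List.splitOn]; exact List.splitOnP_ne_nil _ _)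
  | cons p ps => simp

-- the pieces of splitOn do not contain the separator
theorem pvNlFree (nl : Char) (s : List Char) : ∀ l ∈ s.splitOn nl, nl ∉ l := by
  induction s with
  | nil => simp [List.splitOn_nil]
  | cons c rest ih =>
    intro l hl
    have hne : rest.splitOn nl ≠ [] := List.splitOnP_ne_nil _ _
    by_cases hc : c = nl
    · rw [show (c :: rest).splitOn nl = [] :: rest.splitOn nl by
        simp [List.splitOn, List.splitOnP_cons, hc], List.mem_cons] at hl
      rcases hl with h | h
      · simp [h]
      · exact ih l h
    · rw [show (c :: rest).splitOn nl = List.modifyHead (List.cons c) (rest.splitOn nl) by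
        simp [List.splitOn, List.splitOnP_cons, hc]] at hl
      cases hs : rest.splitOn nl with
      | nil => exact absurd hs hne
      | cons p ps =>
        rw [hs, List.modifyHead_cons, List.mem_cons] at hl
        rcases hl with h | h
        · intro hmem
          rw [h, List.mem_cons] at hmem
          rcases hmem with h2 | h2
          · exact hc h2.symm
          · exact ih p (by rw [hs]; simp) h2
        · exact ih l (by rw [hs]; simp [h])

-- join over a nonempty tail
theorem pvJoinCons (a : List Char) (M : List (List Char)) (h : M ≠ []) :
    PySem.Chars.join ['\n'] (a :: M) = a ++ '\n' :: PySem.Chars.join ['\n'] M := by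
  cases M with
  | nil => exact absurd rfl h
  | cons b t => rw [PySem.Chars.join_cons_cons]; simp

theorem pvJoinAppend (xs ys : List (List Char)) (hx : xs ≠ []) (hy : ys ≠ []) :
    PySem.Chars.join ['\n'] (xs ++ ys)
      = PySem.Chars.join ['\n'] xs ++ '\n' :: PySem.Chars.join ['\n'] ys := by
  induction xs with
  | nil => exact absurd rfl hx
  | cons a t ih =>
    cases t with
    | nil => simp [PySem.Chars.join_singleton, pvJoinCons a ys hy]
    | cons b u =>
      rw [List.cons_append, pvJoinCons a ((b :: u) ++ ys) (by simp),
          pvJoinCons a (b :: u) (by simp), ih (by simp)]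
      simp

-- A's search loop, in terms of List.findIdx on the tail
theorem pvFindIdxA_eq : ∀ (rest : List (List Char)) (i : Nat),
    pvFindIdxA (i + 1) rest (i + 1 + rest.length)
      = i + 1 + List.findIdx (fun l => PySem.Chars.startswith l pvHeaderPat) rest := by
  intro rest
  induction rest with
  | nil => intro i; simp [pvFindIdxA]
  | cons r rs ih =>
    intro i
    rw [pvFindIdxA]
    by_cases hm : PySem.Chars.startswith r pvHeaderPat
    · simp [hm, List.findIdx_cons]
    · have h1 : i + 1 + (r :: rs).length = (i + 1) + 1 + rs.length := by simp; omega
      rw [if_neg (by simp [hm]), h1, ih (i + 1)]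
      simp [List.findIdx_cons, hm]
      omega

-- A's insertion loop splices the entry lines in at the insertion index
theorem pvInsLoopA_splice : ∀ (elines : List (List Char)) (lines : List (List Char)) (idx j : Nat),
    idx + j ≤ lines.length →
    pvInsLoopA idx j elines lines
      = lines.take (idx + j) ++ elines ++ lines.drop (idx + j) := by
  intro elines
  induction elines with
  | nil => intro lines idx j h; simp [pvInsLoopA]
  | cons el rest ih =>
    intro lines idx j h
    rw [pvInsLoopA]
    have hc : (idx : Int) + (j : Int) = ((idx + j : Nat) : Int) := by push_cast; ring
    rw [hc, PySem.List.insert_natCast lines (idx + j) el h]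
    rw [ih _ idx (j + 1) (by simp; omega)]
    have hlen : (lines.take (idx + j)).length = idx + j := by simp; omega
    have h2 : idx + (j + 1) = (lines.take (idx + j)).length + 1 := by omega
    rw [h2, List.take_append, List.drop_append]
    simp
    rw [List.take_of_length_le (by simp), List.drop_eq_nil_of_le (by simp)]
    simp

-- find returns the position of the first occurrence
theorem pvFindEq (s sub : List Char) (n : Nat) (hocc : sub <+: s.drop n)
    (hmin : ∀ i < n, ¬ sub <+: s.drop i) : PySem.Chars.find s sub = n := by
  have hinf : sub <:+: s := hocc.isInfix.trans (List.drop_suffix n s).isInfix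
  have h0 : 0 ≤ PySem.Chars.find s sub := (PySem.Chars.find_nonneg_iff s sub).2 hinf
  obtain ⟨h1, h2⟩ := PySem.Chars.find_spec h0
  have hle : (PySem.Chars.find s sub).toNat ≤ n := by
    by_contra hlt
    push Not at hlt
    exact h2 n (by omega) hocc
  have hge : n ≤ (PySem.Chars.find s sub).toNat := by
    by_contra hlt
    push Not at hlt
    exact hmin _ (by omega) h1
  omega

-- a pattern starting with '\n' never occurs inside a '\n'-free list
theorem pvNoOcc (u pat' : List Char) (hu : '\n' ∉ u) (m : Nat) :
    ¬ ('\n' :: pat') <+: u.drop m := by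
  intro h
  obtain ⟨t, ht⟩ := h
  have : '\n' ∈ u.drop m := by rw [← ht]; simp
  exact hu (List.mem_of_mem_drop this)

theorem pvFindFree (u pat' : List Char) (hu : '\n' ∉ u) :
    PySem.Chars.find u ('\n' :: pat') = -1 := by
  rw [PySem.Chars.find_eq_neg_one_iff]
  intro hinf
  obtain ⟨j, hj⟩ := (PySem.Chars.exists_prefix_drop_iff_isIn _ _).2
    ((PySem.Chars.isIn_iff_infix _ _).2 hinf)
  exact pvNoOcc u pat' hu j hj

-- occurrences inside u ++ v with '\n'-free u live in v
theorem pvOccShift (u v pat' : List Char) (hu : '\n' ∉ u) (j : Nat)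
    (h : ('\n' :: pat') <+: (u ++ v).drop j) :
    u.length ≤ j ∧ ('\n' :: pat') <+: v.drop (j - u.length) := by
  rw [List.drop_append] at h
  by_cases hj : u.length ≤ j
  · rw [List.drop_eq_nil_of_le hj] at h
    exact ⟨hj, by simpa using h⟩
  · exfalso
    obtain ⟨t, ht⟩ := h
    have hne : u.drop j ≠ [] := by
      simp [List.drop_eq_nil_iff]; omega
    cases hd : u.drop j with
    | nil => exact hne hd
    | cons c w =>
      rw [hd] at ht
      have hc : c = '\n' := by
        have := congrArg (fun l => l.head?) ht
        simpa using this.symm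
      apply hu
      have : c ∈ u.drop j := by rw [hd]; simp
      rw [hc] at this
      exact List.mem_of_mem_drop this

theorem pvFindShift (u v pat' : List Char) (hu : '\n' ∉ u) :
    PySem.Chars.find (u ++ v) ('\n' :: pat')
      = if PySem.Chars.find v ('\n' :: pat') = -1 then -1
        else u.length + PySem.Chars.find v ('\n' :: pat') := by
  set q := PySem.Chars.find v ('\n' :: pat') with hq
  by_cases hq1 : q = -1
  · rw [if_pos hq1]
    rw [PySem.Chars.find_eq_neg_one_iff]
    intro hinf
    obtain ⟨j, hj⟩ := (PySem.Chars.exists_prefix_drop_iff_isIn _ _).2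
      ((PySem.Chars.isIn_iff_infix _ _).2 hinf)
    obtain ⟨hle, hocc⟩ := pvOccShift u v pat' hu j hj
    have h3 : ('\n' :: pat') <:+: v := hocc.isInfix.trans (List.drop_suffix _ v).isInfix
    rw [← PySem.Chars.find_ne_neg_one_iff, ← hq] at h3
    exact h3 hq1
  · have h0 : 0 ≤ q := by have := PySem.Chars.neg_one_le_find v ('\n' :: pat'); omega
    obtain ⟨h1, h2⟩ := PySem.Chars.find_spec (sub := '\n' :: pat') (s := v) (by rw [← hq]; exact h0)
    rw [if_neg hq1]
    have heq := pvFindEq (u ++ v) ('\n' :: pat') (u.length + q.toNat)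
      (by rw [List.drop_append]
          rw [List.drop_eq_nil_of_le (by omega), Nat.add_sub_cancel_left]
          simpa [← hq] using h1)
      (by intro i hi hocc
          obtain ⟨hle, hocc'⟩ := pvOccShift u v pat' hu i hocc
          exact h2 (i - u.length) (by omega) (by simpa [← hq] using hocc'))
    rw [heq]
    push_cast
    omega

theorem pvFindCons (x : Char) (t pat' : List Char) (h : ¬ ('\n' :: pat') <+: (x :: t)) :
    PySem.Chars.find (x :: t) ('\n' :: pat')
      = if PySem.Chars.find t ('\n' :: pat') = -1 then -1
        else 1 + PySem.Chars.find t ('\n' :: pat') := by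
  set q := PySem.Chars.find t ('\n' :: pat') with hq
  by_cases hq1 : q = -1
  · rw [if_pos hq1]
    rw [PySem.Chars.find_eq_neg_one_iff]
    intro hinf
    obtain ⟨j, hj⟩ := (PySem.Chars.exists_prefix_drop_iff_isIn _ _).2
      ((PySem.Chars.isIn_iff_infix _ _).2 hinf)
    cases j with
    | zero => exact h (by simpa using hj)
    | succ j =>
      rw [List.drop_succ_cons] at hj
      have h3 : ('\n' :: pat') <:+: t := hj.isInfix.trans (List.drop_suffix _ t).isInfix
      rw [← PySem.Chars.find_ne_neg_one_iff, ← hq] at h3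
      exact h3 hq1
  · have h0 : 0 ≤ q := by have := PySem.Chars.neg_one_le_find t ('\n' :: pat'); omega
    obtain ⟨h1, h2⟩ := PySem.Chars.find_spec (sub := '\n' :: pat') (s := t) (by rw [← hq]; exact h0)
    rw [if_neg hq1]
    have heq := pvFindEq (x :: t) ('\n' :: pat') (1 + q.toNat)
      (by rw [show 1 + q.toNat = q.toNat + 1 by omega, List.drop_succ_cons]
          simpa [← hq] using h1)
      (by intro i hi hocc
          cases i with
          | zero => exact h (by simpa using hocc)
          | succ i =>
            rw [List.drop_succ_cons] at hocc
            exact h2 i (by omega) (by simpa [← hq] using hocc))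
    rw [heq]
    push_cast
    omega

-- a '\n'-free pattern is a prefix of u ++ '\n' :: w iff it is a prefix of u
theorem pvPrefixBoundary (p u w : List Char) (hp : '\n' ∉ p) :
    p <+: u ++ '\n' :: w ↔ p <+: u := by
  constructor
  · intro h
    by_cases hl : p.length ≤ u.length
    · rw [List.prefix_iff_eq_take] at h ⊢
      exact h.trans (List.take_append_of_le_length hl)
    · exfalso
      apply hp
      have hlt : u.length < p.length := by omega
      have hv : p[u.length]'hlt = '\n' := by
        rw [List.IsPrefix.getElem h hlt, List.getElem_append_right (by omega)]
        simp
      exact hv ▸ List.getElem_mem hlt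
  · intro h
    exact h.trans (List.prefix_append u _)

-- A's result on the tail of the line list (first line stripped)
def pvG (rest : List (List Char)) : Nat :=
  List.findIdx (fun l => PySem.Chars.startswith l pvHeaderPat) rest

def pvAf (elines rest : List (List Char)) : List Char :=
  PySem.Chars.join ['\n'] (rest.take (pvG rest) ++ elines ++ rest.drop (pvG rest))

-- B's result on the tail of the line list
def pvBf (es : List Char) (rest : List (List Char)) : List Char :=
  match rest with
  | [] => es
  | r :: rs =>
    if PySem.Chars.find ('\n' :: PySem.Chars.join ['\n'] (r :: rs)) ('\n' :: pvHeaderPat) = -1 then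
      PySem.Chars.join ['\n'] (r :: rs) ++ '\n' :: es
    else
      (PySem.Chars.join ['\n'] (r :: rs)).take
          (PySem.Chars.find ('\n' :: PySem.Chars.join ['\n'] (r :: rs)) ('\n' :: pvHeaderPat)).toNat
        ++ es ++ '\n' :: (PySem.Chars.join ['\n'] (r :: rs)).drop
          (PySem.Chars.find ('\n' :: PySem.Chars.join ['\n'] (r :: rs)) ('\n' :: pvHeaderPat)).toNat

theorem pvBf_cons_eq (es : List Char) (r : List Char) (rs : List (List Char)) :
    pvBf es (r :: rs)
      = if PySem.Chars.find ('\n' :: PySem.Chars.join ['\n'] (r :: rs)) ('\n' :: pvHeaderPat) = -1 then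
          PySem.Chars.join ['\n'] (r :: rs) ++ '\n' :: es
        else
          (PySem.Chars.join ['\n'] (r :: rs)).take
              (PySem.Chars.find ('\n' :: PySem.Chars.join ['\n'] (r :: rs)) ('\n' :: pvHeaderPat)).toNat
            ++ es ++ '\n' :: (PySem.Chars.join ['\n'] (r :: rs)).drop
              (PySem.Chars.find ('\n' :: PySem.Chars.join ['\n'] (r :: rs)) ('\n' :: pvHeaderPat)).toNat := rfl

-- in the no-match case B's tail function peels the first line
theorem pvBfShift (es : List Char) (r : List Char) (rs : List (List Char))
    (hr : '\n' ∉ r) (hm : ¬ PySem.Chars.startswith r pvHeaderPat = true) :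
    pvBf es (r :: rs) = r ++ '\n' :: pvBf es rs := by
  rw [pvBf_cons_eq]
  cases rs with
  | nil =>
    simp only [PySem.Chars.join_singleton]
    have hnotpre : ¬ ('\n' :: pvHeaderPat) <+: ('\n' :: r) := by
      intro h
      exact hm ((PySem.Chars.startswith_iff _ _).2 (List.cons_prefix_cons.1 h).2)
    rw [pvFindCons _ _ _ hnotpre, pvFindFree r pvHeaderPat hr, if_pos rfl, if_pos rfl]
    rfl
  | cons b u =>
    have hT : PySem.Chars.join ['\n'] (r :: b :: u)
        = r ++ '\n' :: PySem.Chars.join ['\n'] (b :: u) := pvJoinCons r (b :: u) (by simp)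
    set t' := PySem.Chars.join ['\n'] (b :: u) with ht'
    set q2 := PySem.Chars.find ('\n' :: t') ('\n' :: pvHeaderPat) with hq2
    have hnotpre : ¬ ('\n' :: pvHeaderPat) <+: ('\n' :: PySem.Chars.join ['\n'] (r :: b :: u)) := by
      intro h
      have h2 := (List.cons_prefix_cons.1 h).2
      rw [hT] at h2
      exact hm ((PySem.Chars.startswith_iff _ _).2
        ((pvPrefixBoundary pvHeaderPat r t' (by decide)).1 h2))
    have hc2 : PySem.Chars.find ('\n' :: PySem.Chars.join ['\n'] (b :: u)) ('\n' :: pvHeaderPat) = q2 := by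
      rw [← ht']
    by_cases hq : q2 = -1
    · have hfT : PySem.Chars.find (PySem.Chars.join ['\n'] (r :: b :: u)) ('\n' :: pvHeaderPat) = -1 := by
        rw [hT, pvFindShift r ('\n' :: t') pvHeaderPat hr, ← hq2, if_pos hq]
      have hfC : PySem.Chars.find ('\n' :: PySem.Chars.join ['\n'] (r :: b :: u)) ('\n' :: pvHeaderPat) = -1 := by
        rw [pvFindCons _ _ _ hnotpre, hfT, if_pos rfl]
      rw [pvBf_cons_eq, if_pos hfC, hc2, if_pos hq, hT]
      simp [ht']
    · have h0 : 0 ≤ q2 := by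
        have := PySem.Chars.neg_one_le_find ('\n' :: t') ('\n' :: pvHeaderPat)
        omega
      have hfC : PySem.Chars.find ('\n' :: PySem.Chars.join ['\n'] (r :: b :: u)) ('\n' :: pvHeaderPat)
          = 1 + ((r.length : Int) + q2) := by
        rw [pvFindCons _ _ _ hnotpre, hT, pvFindShift r ('\n' :: t') pvHeaderPat hr, ← hq2,
            if_neg hq, if_neg (by omega)]
      have htn : (1 + ((r.length : Int) + q2)).toNat = r.length + (1 + q2.toNat) := by omega
      have htake : (r ++ '\n' :: t').take (r.length + (1 + q2.toNat))
          = r ++ '\n' :: t'.take q2.toNat := by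
        rw [List.take_append, List.take_of_length_le (by omega)]
        congr 1
        have h5 : r.length + (1 + q2.toNat) - r.length = q2.toNat + 1 := by omega
        rw [h5, List.take_succ_cons]
      have hdrop : (r ++ '\n' :: t').drop (r.length + (1 + q2.toNat))
          = t'.drop q2.toNat := by
        rw [List.drop_append, List.drop_eq_nil_of_le (by omega)]
        have h5 : r.length + (1 + q2.toNat) - r.length = q2.toNat + 1 := by omega
        rw [h5, List.drop_succ_cons]
        simp
      rw [pvBf_cons_eq, if_neg (by rw [hfC]; omega), hfC, hT, htn, htake, hdrop,
          hc2, if_neg hq]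
      simp
      rw [← ht']

theorem pvMain : ∀ (rest : List (List Char)) (elines : List (List Char)) (es : List Char),
    (∀ l ∈ rest, '\n' ∉ l) → elines ≠ [] → PySem.Chars.join ['\n'] elines = es →
    pvAf elines rest = pvBf es rest := by
  intro rest
  induction rest with
  | nil =>
    intro elines es hfree hne hjoin
    show PySem.Chars.join ['\n'] (List.take (pvG []) [] ++ elines ++ List.drop (pvG []) []) = es
    simpa using hjoin
  | cons r rs ih =>
    intro elines es hfree hne hjoin
    have hr : '\n' ∉ r := hfree r (by simp)
    have hrs : ∀ l ∈ rs, '\n' ∉ l := fun l hl => hfree l (by simp [hl])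
    by_cases hm : PySem.Chars.startswith r pvHeaderPat = true
    · -- first line of the tail already is a version header: insert before it
      have hg : pvG (r :: rs) = 0 := by simp [pvG, List.findIdx_cons, hm]
      have hAf : pvAf elines (r :: rs) = es ++ '\n' :: PySem.Chars.join ['\n'] (r :: rs) := by
        rw [pvAf, hg]
        simp only [List.take_zero, List.drop_zero, List.nil_append]
        rw [pvJoinAppend elines (r :: rs) hne (by simp), hjoin]
      have hpre : pvHeaderPat <+: PySem.Chars.join ['\n'] (r :: rs) := by
        cases rs with
        | nil =>
          rw [PySem.Chars.join_singleton]
          exact (PySem.Chars.startswith_iff _ _).1 hm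
        | cons b u =>
          rw [pvJoinCons r (b :: u) (by simp)]
          exact ((PySem.Chars.startswith_iff _ _).1 hm).trans (List.prefix_append r _)
      have hq0 := pvFindEq ('\n' :: PySem.Chars.join ['\n'] (r :: rs)) ('\n' :: pvHeaderPat) 0
        (by rw [List.drop_zero]; exact List.cons_prefix_cons.2 ⟨rfl, hpre⟩)
        (by intro i hi; omega)
      have hq : PySem.Chars.find ('\n' :: PySem.Chars.join ['\n'] (r :: rs)) ('\n' :: pvHeaderPat) = 0 := by
        simpa using hq0
      rw [hAf, pvBf_cons_eq, hq, if_neg (by decide)]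
      simp
    · have hg : pvG (r :: rs) = pvG rs + 1 := by simp [pvG, List.findIdx_cons, hm]
      have hAf : pvAf elines (r :: rs) = r ++ '\n' :: pvAf elines rs := by
        rw [pvAf, hg, List.take_succ_cons, List.drop_succ_cons, List.cons_append]
        exact pvJoinCons r _ (by simp [hne])
      rw [hAf, pvBfShift es r rs hr hm, ih elines es hrs hne hjoin]

-- ===== VERDICT (by name: the statement is the Claim_ definition above) =====
theorem insert_changelog_entry_spec : Claim_equal_insert_changelog_entry := by
  unfold Claim_equal_insert_changelog_entry
  intro c e _hdom
  show insert_changelog_entry c e = insert_changelog_entry_alt c e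
  have hAe : insert_changelog_entry c e
      = String.ofList (PySem.Chars.join ['\n'] (pvInsLoopA
          (pvFindIdxA 0 (PySem.Chars.splitOn c.toList ['\n']) (PySem.Chars.splitOn c.toList ['\n']).length)
          0 (PySem.Chars.splitOn e.toList ['\n']) (PySem.Chars.splitOn c.toList ['\n']))) := rfl
  have hBe : insert_changelog_entry_alt c e
      = if PySem.Chars.find c.toList pvPatB ≠ -1 then
          String.ofList (PySem.List.slice c.toList none (some (PySem.Chars.find c.toList pvPatB + 1))
            ++ e.toList ++ '\n' :: PySem.List.slice c.toList (some (PySem.Chars.find c.toList pvPatB + 1)) none)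
        else String.ofList (c.toList ++ '\n' :: e.toList) := rfl
  have hpat : pvPatB = '\n' :: pvHeaderPat := rfl
  have hsp := pvSplitOn_eq '\n' c.toList
  have hne : c.toList.splitOn '\n' ≠ [] := List.splitOnP_ne_nil _ _
  rw [hAe, hBe, hpat]
  cases hls : c.toList.splitOn '\n' with
  | nil => exact absurd hls hne
  | cons l0 rest =>
    have hesp := pvSplitOn_eq '\n' e.toList
    have hene : e.toList.splitOn '\n' ≠ [] := List.splitOnP_ne_nil _ _
    have hejoin : PySem.Chars.join ['\n'] (e.toList.splitOn '\n') = e.toList := by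
      rw [PySem.Chars.join.eq_1]
      exact List.intercalate_splitOn e.toList '\n'
    have hcjoin : PySem.Chars.join ['\n'] (l0 :: rest) = c.toList := by
      rw [← hls, PySem.Chars.join.eq_1]
      exact List.intercalate_splitOn c.toList '\n'
    have hfree := pvNlFree '\n' c.toList
    have hl0 : '\n' ∉ l0 := hfree l0 (by rw [hls]; simp)
    have hrest : ∀ l ∈ rest, '\n' ∉ l := fun l hl => hfree l (by rw [hls]; simp [hl])
    have hidx : pvFindIdxA 0 (l0 :: rest) ((l0 :: rest).length) = pvG rest + 1 := by
      have h1 : pvFindIdxA 0 (l0 :: rest) ((l0 :: rest).length)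
          = if PySem.Chars.startswith l0 pvHeaderPat && decide ((0:Nat) < 0) then 0
            else pvFindIdxA (0 + 1) rest ((l0 :: rest).length) := rfl
      rw [h1, if_neg (by simp)]
      have h2 : (l0 :: rest).length = 0 + 1 + rest.length := by simp; omega
      rw [h2, pvFindIdxA_eq rest 0]
      unfold pvG
      omega
    have hgle : pvG rest ≤ rest.length := List.findIdx_le_length
    have hA : PySem.Chars.join ['\n'] (pvInsLoopA (pvG rest + 1) 0 (e.toList.splitOn '\n') (l0 :: rest))
        = l0 ++ '\n' :: pvAf (e.toList.splitOn '\n') rest := by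
      rw [pvInsLoopA_splice (e.toList.splitOn '\n') (l0 :: rest) (pvG rest + 1) 0 (by simp; omega),
          Nat.add_zero, List.take_succ_cons, List.drop_succ_cons, List.cons_append]
      exact pvJoinCons l0 _ (by simp [hene])
    have hmain := pvMain rest (e.toList.splitOn '\n') e.toList hrest hene hejoin
    rw [hsp, hls, hesp, hidx, hA, hmain]
    cases rest with
    | nil =>
      have hc : c.toList = l0 := by rw [← hcjoin, PySem.Chars.join_singleton]
      have hfind : PySem.Chars.find c.toList ('\n' :: pvHeaderPat) = -1 := by
        rw [hc]
        exact pvFindFree l0 pvHeaderPat hl0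
      rw [hfind, if_neg (by simp), hc]
      rfl
    | cons b u =>
      have hcT : c.toList = l0 ++ '\n' :: PySem.Chars.join ['\n'] (b :: u) := by
        rw [← hcjoin, pvJoinCons l0 (b :: u) (by simp)]
      set T := PySem.Chars.join ['\n'] (b :: u) with hT
      set q := PySem.Chars.find ('\n' :: T) ('\n' :: pvHeaderPat) with hq
      have hfind : PySem.Chars.find c.toList ('\n' :: pvHeaderPat)
          = if q = -1 then -1 else l0.length + q := by
        rw [hcT, pvFindShift l0 ('\n' :: T) pvHeaderPat hl0, ← hq]
      have hBfq : pvBf e.toList (b :: u)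
          = if q = -1 then T ++ '\n' :: e.toList
            else T.take q.toNat ++ e.toList ++ '\n' :: T.drop q.toNat := by
        rw [pvBf_cons_eq, ← hT, ← hq]
      by_cases hqc : q = -1
      · rw [hfind, if_pos hqc, if_neg (by simp), hBfq, if_pos hqc, hcT]
        simp
      · have h0 : 0 ≤ q := by
          have := PySem.Chars.neg_one_le_find ('\n' :: T) ('\n' :: pvHeaderPat)
          omega
        rw [hfind, if_neg hqc, if_pos (by omega), hBfq, if_neg hqc,
            PySem.List.slice_to c.toList (by omega), PySem.List.slice_from c.toList (by omega), hcT]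
        have htn : ((l0.length : Int) + q + 1).toNat = l0.length + (1 + q.toNat) := by omega
        have htake : (l0 ++ '\n' :: T).take (l0.length + (1 + q.toNat))
            = l0 ++ '\n' :: T.take q.toNat := by
          rw [List.take_append, List.take_of_length_le (by omega)]
          congr 1
          have h5 : l0.length + (1 + q.toNat) - l0.length = q.toNat + 1 := by omega
          rw [h5, List.take_succ_cons]
        have hdrop : (l0 ++ '\n' :: T).drop (l0.length + (1 + q.toNat))
            = T.drop q.toNat := by
          rw [List.drop_append, List.drop_eq_nil_of_le (by omega)]
          have h5 : l0.length + (1 + q.toNat) - l0.length = q.toNat + 1 := by omega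
          rw [h5, List.drop_succ_cons]
          simp
        rw [htn, htake, hdrop]
        simp
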